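-- pv_equiv track=rewrite | github.com/auraxite/msu-prac-3 | pascaltriangle.py | pastri
-- ===== SOURCE A (Python) =====
-- from math import comb
--
-- def pastri(n, filler):
--     triangle = []
--     for i in range(n):
--         row = []
--         for j in range(i + 1):
--             row.append(str(comb(i, j)))
--         triangle.append(filler.join(row))
--
--     width = len(triangle[-1])
--     center = []
--     for line in triangle:
--         empty = width - len(line)
--         left = empty // 2
--         right = empty - left
--         center.append(filler * left + line + filler * right)
--
--     return '\n'.join(center)
-- ===== SOURCE B (Python) =====
-- def pastri(n, filler):
--     lines = []
--     row = [1]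
--     for _ in range(n):
--         lines.append(filler.join(map(str, row)))
--         row = [1] + [a + b for a, b in zip(row, row[1:])] + [1]
--     width = len(lines[-1])
--     return '\n'.join(_center(line, width, filler) for line in lines)
--
-- def _center(line, width, filler):
--     pad = width - len(line)
--     return filler * (pad // 2) + line + filler * (pad - pad // 2)
-- ===== Notes on version B (the rewrite author's own statement) =====
-- stated objective: alternative
-- what changed: B builds each Pascal row from the previous one by adjacent sums (Pascal's rule, zip of the row with its tail) instead of calling comb(i, j) from scratch for every entry, and centers via a list comprehension with a helper instead of an accumulator loop; runtime is dominated by the string output in both, so no measured speedup.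
import Mathlib
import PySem

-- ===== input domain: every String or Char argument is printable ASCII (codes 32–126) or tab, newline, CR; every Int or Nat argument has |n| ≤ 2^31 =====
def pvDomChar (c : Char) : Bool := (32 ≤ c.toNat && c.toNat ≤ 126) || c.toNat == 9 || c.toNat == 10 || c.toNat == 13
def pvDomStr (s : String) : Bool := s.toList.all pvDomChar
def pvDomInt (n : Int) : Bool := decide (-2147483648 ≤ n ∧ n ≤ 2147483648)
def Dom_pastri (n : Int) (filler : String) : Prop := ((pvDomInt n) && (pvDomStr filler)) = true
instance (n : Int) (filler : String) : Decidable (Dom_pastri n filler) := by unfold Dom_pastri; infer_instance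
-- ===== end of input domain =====

-- B builds each Pascal row from the previous one by adjacent sums (Pascal's rule) instead of calling comb per entry; same cost overall (string output dominates).

-- ===== PORT A =====
-- math.comb i j for the nonnegative arguments A uses (0 ≤ j ≤ i); exact there
def pyComb (i j : Int) : Int := (Nat.choose i.toNat j.toNat : Int)
-- Python string repetition s * k (k ≤ 0 gives ""); exact via PySem.List.pyRepeat on code points
def strMul (s : String) (k : Int) : String := String.ofList (PySem.List.pyRepeat s.toList k)

def pastri (n : Int) (filler : String) : String :=
  let triangle := (PySem.List.pyRange 0 n 1).foldl (fun tri i =>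
    let row := (PySem.List.pyRange 0 (i + 1) 1).foldl
      (fun r j => r ++ [PySem.Int.toStr (pyComb i j)]) []
    tri ++ [PySem.Str.join filler row]) []
  -- triangle[-1]: IndexError when triangle = [] (n ≤ 0), excluded by Pre_pastri
  let width := PySem.Str.len ((PySem.List.pyGet? triangle (-1)).getD "")
  let center := triangle.foldl (fun c line =>
    let empty := width - PySem.Str.len line
    let left := PySem.Int.floordiv empty 2
    let right := empty - left
    c ++ [strMul filler left ++ line ++ strMul filler right]) []
  PySem.Str.join "\n" center

-- ===== PORT B =====
-- row = [1] + [a + b for a, b in zip(row, row[1:])] + [1]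
def pascalNext (row : List Int) : List Int :=
  1 :: (List.zipWith (· + ·) row (PySem.List.slice row (some 1) none) ++ [1])

def centerLine (line : String) (width : Int) (filler : String) : String :=
  let pad := width - PySem.Str.len line
  strMul filler (PySem.Int.floordiv pad 2) ++ line ++ strMul filler (pad - PySem.Int.floordiv pad 2)

def pastri_alt (n : Int) (filler : String) : String :=
  let st := (PySem.List.pyRange 0 n 1).foldl
    (fun (st : List String × List Int) _ =>
      (st.1 ++ [PySem.Str.join filler (st.2.map PySem.Int.toStr)], pascalNext st.2))
    ([], [1])
  let lines := st.1
  -- lines[-1]: IndexError when n ≤ 0, excluded by Pre_pastri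
  let width := PySem.Str.len ((PySem.List.pyGet? lines (-1)).getD "")
  PySem.Str.join "\n" (lines.map (fun line => centerLine line width filler))

-- ===== PRECONDITION & SPEC =====
-- Pre_ excludes n ≤ 0, where both Pythons raise IndexError on triangle[-1] / lines[-1]
def Pre_pastri (n : Int) (filler : String) : Prop := 1 ≤ n
instance (n : Int) (filler : String) : Decidable (Pre_pastri n filler) := by unfold Pre_pastri; infer_instance
def pvWitness_pastri : Int × String := (3, " ")

def Spec_pastri (n : Int) (filler : String) (out : String) : Prop := out = pastri_alt n filler
instance (n : Int) (filler : String) (out : String) : Decidable (Spec_pastri n filler out) := by unfold Spec_pastri; infer_instance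

-- ===== CLAIM (what is proved, stated in full; the proofs are below) =====
def Claim_equal_pastri : Prop := ∀ (n : Int) (filler : String), Dom_pastri n filler → Pre_pastri n filler → Spec_pastri n filler (pastri n filler)

-- ===== LEMMAS AND PROOFS =====

-- the i-th Pascal row
def pasRow (i : Nat) : List Int := (List.range (i + 1)).map (fun j => (Nat.choose i j : Int))

lemma zip_adj (c : Nat → Int) (m : Nat) :
    List.zipWith (· + ·) ((List.range (m + 1)).map c) (((List.range (m + 1)).map c).tail)
      = (List.range m).map (fun k => c k + c (k + 1)) := by
  apply List.ext_getElem
  · simp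
  · intro k h1 h2
    simp at h1
    simp [List.getElem_zipWith, List.getElem_tail]

lemma pascalNext_pasRow (i : Nat) : pascalNext (pasRow i) = pasRow (i + 1) := by
  unfold pascalNext pasRow
  rw [PySem.List.slice_from_one, zip_adj]
  apply List.ext_getElem
  · simp
  · intro k h1 h2
    simp at h1
    match k, h1 with
    | 0, _ => simp
    | k + 1, h1 =>
      simp only [List.getElem_cons_succ, List.getElem_map, List.getElem_range]
      by_cases hk : k < i
      · rw [List.getElem_append_left (by simpa)]
        simp [Nat.choose_succ_succ]
      · have hki : k = i := by omega
        subst hki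
        rw [List.getElem_append_right (by simp)]
        simp

lemma foldB (filler : String) (l : List Int) (acc : List String) (i : Nat) :
    l.foldl (fun (st : List String × List Int) _ =>
        (st.1 ++ [PySem.Str.join filler (st.2.map PySem.Int.toStr)], pascalNext st.2))
      (acc, pasRow i)
    = (acc ++ (List.range l.length).map
        (fun t => PySem.Str.join filler ((pasRow (i + t)).map PySem.Int.toStr)),
       pasRow (i + l.length)) := by
  induction l generalizing acc i with
  | nil => simp
  | cons x t ih =>
    simp only [List.foldl_cons, pascalNext_pasRow]
    rw [ih]
    refine Prod.ext ?_ ?_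
    · show acc ++ [_] ++ _ = _
      rw [List.length_cons, List.range_succ_eq_map]
      simp only [List.map_cons, List.map_map, Function.comp_def, Nat.add_zero, List.append_assoc,
        List.singleton_append]
      congr 1
      congr 1
      apply List.map_congr_left
      intro a _
      have h : i + 1 + a = i + (a + 1) := by omega
      rw [h]
    · show pasRow (i + 1 + t.length) = pasRow (i + (x :: t).length)
      have h : i + 1 + t.length = i + (x :: t).length := by simp; omega
      rw [h]

lemma rowA_eq (k : Nat) :
    (PySem.List.pyRange 0 ((k : Int) + 1) 1).map (fun j => PySem.Int.toStr (pyComb (k : Int) j))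
      = (pasRow k).map PySem.Int.toStr := by
  rw [PySem.List.pyRange_one]
  have h : ((k : Int) + 1 - 0).toNat = k + 1 := by omega
  rw [h]
  unfold pasRow
  simp [List.map_map, Function.comp_def, pyComb]

lemma triangle_eq (n : Int) (filler : String) :
    (PySem.List.pyRange 0 n 1).map (fun i =>
        PySem.Str.join filler ((PySem.List.pyRange 0 (i + 1) 1).map
          (fun j => PySem.Int.toStr (pyComb i j))))
    = ((PySem.List.pyRange 0 n 1).foldl
        (fun (st : List String × List Int) _ =>
          (st.1 ++ [PySem.Str.join filler (st.2.map PySem.Int.toStr)], pascalNext st.2))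
        ([], [1])).1 := by
  have h1 : ([1] : List Int) = pasRow 0 := rfl
  rw [h1, foldB]
  rw [PySem.List.pyRange_one]
  simp only [List.map_map, Function.comp_def, List.length_map, List.length_range,
    List.nil_append, Int.sub_zero, Int.zero_add, Nat.zero_add]
  apply List.map_congr_left
  intro a _
  rw [rowA_eq]

-- ===== VERDICT (by name: the statement is the Claim_ definition above) =====
theorem pastri_spec : Claim_equal_pastri := by
  intro n filler _ _
  show pastri n filler = pastri_alt n filler
  unfold pastri pastri_alt centerLine
  simp only [PySem.List.foldl_append_singleton_eq_map, List.nil_append]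
  rw [triangle_eq n filler]
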